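-- pv_equiv track=rewrite | github.com/pipilurj/bootstrapped-preference-optimization-BPO | llava/train/llava_trainer.py | split_to_even_chunks
-- ===== SOURCE A (Python) =====
-- def split_to_even_chunks(indices, lengths, num_chunks):
--     """
--     Split a list of indices into `chunks` chunks of roughly equal lengths.
--     """
--
--     if len(indices) % num_chunks != 0:
--         return [indices[i::num_chunks] for i in range(num_chunks)]
--
--     num_indices_per_chunk = len(indices) // num_chunks
--
--     chunks = [[] for _ in range(num_chunks)]
--     chunks_lengths = [0 for _ in range(num_chunks)]
--     for index in indices:
--         shortest_chunk = chunks_lengths.index(min(chunks_lengths))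
--         chunks[shortest_chunk].append(index)
--         chunks_lengths[shortest_chunk] += lengths[index]
--         if len(chunks[shortest_chunk]) == num_indices_per_chunk:
--             chunks_lengths[shortest_chunk] = float("inf")
--
--     return chunks
-- ===== SOURCE B (Python) =====
-- from bisect import insort
--
--
-- def split_to_even_chunks(indices, lengths, num_chunks):
--     """
--     Split a list of indices into `chunks` chunks of roughly equal lengths.
--     """
--
--     if len(indices) % num_chunks != 0:
--         return [indices[i::num_chunks] for i in range(num_chunks)]
--
--     num_indices_per_chunk = len(indices) // num_chunks
--
--     chunks = [[] for _ in range(num_chunks)]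
--     # sorted queue of (current_length, chunk_id) for the not-yet-full chunks:
--     # pop the front (shortest chunk, lowest id on ties) instead of rescanning
--     # for the minimum; a full chunk is simply never re-inserted.
--     active = [(0, c) for c in range(num_chunks)]
--     for index in indices:
--         total, c = active.pop(0)
--         chunks[c].append(index)
--         if len(chunks[c]) < num_indices_per_chunk:
--             insort(active, (total + lengths[index], c))
--     return chunks
-- ===== Notes on version B (the rewrite author's own statement) =====
-- stated objective: alternative
-- what changed: Replaces A's per-element linear scans of chunks_lengths (min() + .index(), with a float('inf') sentinel for full chunks) by a sorted queue of (length, chunk_id) pairs maintained with bisect.insort: the shortest chunk is popped from the front and full chunks are simply never re-inserted.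
import Mathlib
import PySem

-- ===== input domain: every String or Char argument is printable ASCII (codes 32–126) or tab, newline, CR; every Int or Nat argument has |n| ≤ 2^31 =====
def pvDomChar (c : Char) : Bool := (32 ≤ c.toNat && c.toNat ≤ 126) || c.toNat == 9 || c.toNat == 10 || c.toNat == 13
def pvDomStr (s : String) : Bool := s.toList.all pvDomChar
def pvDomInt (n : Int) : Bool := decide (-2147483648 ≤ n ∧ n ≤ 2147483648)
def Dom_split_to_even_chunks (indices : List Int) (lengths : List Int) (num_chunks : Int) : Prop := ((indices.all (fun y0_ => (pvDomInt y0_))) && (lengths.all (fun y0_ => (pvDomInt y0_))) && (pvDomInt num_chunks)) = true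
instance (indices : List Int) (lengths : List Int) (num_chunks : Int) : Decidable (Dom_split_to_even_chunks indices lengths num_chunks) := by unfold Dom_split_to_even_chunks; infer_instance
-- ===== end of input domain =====

-- B replaces A's per-element linear scans (min + .index over chunks_lengths, with a
-- float('inf') sentinel for full chunks) by a sorted queue of (length, chunk_id) pairs:
-- pop the front, bisect.insort the updated pair back, drop full chunks.

-- ===== PORT A =====
-- A's chunks_lengths holds ints and float('inf'); modelled as Option Int with
-- none = float('inf').  Python's order on the values that occur (ints and inf,
-- where inf is greater than every int and inf == inf) is exactly the
-- lexicographic order of the key pair (pyInfKey1, pyInfKey2) below.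
def pyInfKey1 (o : Option Int) : Int := if o.isSome then 0 else 1
def pyInfKey2 (o : Option Int) : Int := o.getD 0

-- the body of A's 'for index in indices' loop, acting on (chunks, chunks_lengths)
def stepA (lengths : List Int) (per : Int)
    (st : List (List Int) × List (Option Int)) (index : Int) :
    List (List Int) × List (Option Int) :=
  -- shortest_chunk = chunks_lengths.index(min(chunks_lengths))
  let shortest : Nat :=
    (PySem.List.index? st.2 ((PySem.List.min2? st.2 pyInfKey1 pyInfKey2).getD none)).getD 0
  let chunks := st.1.set shortest (st.1.getD shortest [] ++ [index])
  let cl := st.2.set shortest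
    ((st.2.getD shortest none).map (fun t => t + PySem.List.pyGetD lengths index 0))
  if ((chunks.getD shortest []).length : Int) = per then (chunks, cl.set shortest none)
  else (chunks, cl)

def split_to_even_chunks (indices : List Int) (lengths : List Int) (num_chunks : Int) : List (List Int) :=
  if PySem.Int.mod (indices.length : Int) num_chunks ≠ 0 then
    (PySem.List.pyRange 0 num_chunks 1).map (fun i =>
      (PySem.List.slice? indices (some i) none num_chunks).getD [])
  else
    let per : Int := PySem.Int.floordiv (indices.length : Int) num_chunks
    (indices.foldl (stepA lengths per)
      ((PySem.List.pyRange 0 num_chunks 1).map (fun _ => []),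
       (PySem.List.pyRange 0 num_chunks 1).map (fun _ => some 0))).1

-- ===== PORT B =====
-- exact for bisect.insort on a sorted list of int pairs: insert before the first
-- strictly greater element (Python compares tuples lexicographically)
def insortPair : List (Int × Int) → (Int × Int) → List (Int × Int)
  | [], p => [p]
  | q :: rest, p =>
      if p.1 < q.1 ∨ (p.1 = q.1 ∧ p.2 < q.2) then p :: q :: rest
      else q :: insortPair rest p

-- the body of B's 'for index in indices' loop, acting on (chunks, active)
def stepB (lengths : List Int) (per : Int)
    (st : List (List Int) × List (Int × Int)) (index : Int) :
    List (List Int) × List (Int × Int) :=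
  match st.2 with
  | [] => st          -- active.pop(0) raises IndexError here; unreachable under Pre_
  | (total, c) :: rest =>
    let chunks := st.1.set c.toNat (st.1.getD c.toNat [] ++ [index])
    if ((chunks.getD c.toNat []).length : Int) < per then
      (chunks, insortPair rest (total + PySem.List.pyGetD lengths index 0, c))
    else (chunks, rest)

def split_to_even_chunks_alt (indices : List Int) (lengths : List Int) (num_chunks : Int) : List (List Int) :=
  if PySem.Int.mod (indices.length : Int) num_chunks ≠ 0 then
    (PySem.List.pyRange 0 num_chunks 1).map (fun i =>
      (PySem.List.slice? indices (some i) none num_chunks).getD [])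
  else
    let per : Int := PySem.Int.floordiv (indices.length : Int) num_chunks
    (indices.foldl (stepB lengths per)
      ((PySem.List.pyRange 0 num_chunks 1).map (fun _ => []),
       (PySem.List.pyRange 0 num_chunks 1).map (fun c => ((0 : Int), c)))).1

-- ===== PRECONDITION & SPEC =====
-- Exactly where the Python A returns: num_chunks ≠ 0 (len % num_chunks raises
-- ZeroDivisionError otherwise); and on the divisible path (the only one that
-- touches `lengths` or pops the shortest chunk) every index must be a valid
-- Python index into lengths (else IndexError), and a negative num_chunks with a
-- nonempty indices list raises ValueError (min of the empty chunks list).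
def Pre_split_to_even_chunks (indices : List Int) (lengths : List Int) (num_chunks : Int) : Prop :=
  num_chunks ≠ 0 ∧
  (PySem.Int.mod (indices.length : Int) num_chunks = 0 →
    (1 ≤ num_chunks ∨ indices = []) ∧ ∀ i ∈ indices, PySem.Raise.InRange lengths.length i)
instance (indices : List Int) (lengths : List Int) (num_chunks : Int) : Decidable (Pre_split_to_even_chunks indices lengths num_chunks) := by unfold Pre_split_to_even_chunks; infer_instance

def pvWitness_split_to_even_chunks : List Int × List Int × Int := ([0, 2, 1, 0], [5, 1, 2], 2)

def Spec_split_to_even_chunks (indices : List Int) (lengths : List Int) (num_chunks : Int) (out : List (List Int)) : Prop := out = split_to_even_chunks_alt indices lengths num_chunks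
instance (indices : List Int) (lengths : List Int) (num_chunks : Int) (out : List (List Int)) : Decidable (Spec_split_to_even_chunks indices lengths num_chunks out) := by unfold Spec_split_to_even_chunks; infer_instance

-- ===== CLAIM (what is proved, stated in full; the proofs are below) =====
def Claim_equal_split_to_even_chunks : Prop := ∀ (indices : List Int) (lengths : List Int) (num_chunks : Int), Dom_split_to_even_chunks indices lengths num_chunks → Pre_split_to_even_chunks indices lengths num_chunks → Spec_split_to_even_chunks indices lengths num_chunks (split_to_even_chunks indices lengths num_chunks)

-- ===== LEMMAS AND PROOFS =====

-- lexicographic (Python tuple) strict order on (length, chunk_id) pairs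
def pLt (p q : Int × Int) : Prop := p.1 < q.1 ∨ (p.1 = q.1 ∧ p.2 < q.2)

-- the (value, position) pairs of the non-inf entries of chunks_lengths
def activePairs : List (Option Int) → Int → List (Int × Int)
  | [], _ => []
  | none :: t, c => activePairs t (c + 1)
  | some v :: t, c => (v, c) :: activePairs t (c + 1)

-- simulation invariant tying A's state to B's after m processed indices
structure SimInv (k P m : Nat)
    (stA : List (List Int) × List (Option Int))
    (stB : List (List Int) × List (Int × Int)) : Prop where
  hchunks : stB.1 = stA.1
  hlenC : stA.1.length = k
  hlenL : stA.2.length = k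
  hsorted : stB.2.Pairwise pLt
  hperm : List.Perm stB.2 (activePairs stA.2 0)
  hfull : ∀ c, c < k → (stA.2[c]? = some none ↔ ((stA.1[c]?).getD []).length = P)
  hle : ∀ c, c < k → ((stA.1[c]?).getD []).length ≤ P
  hsum : (stA.1.map List.length).sum = m

lemma mem_activePairs (cl : List (Option Int)) (c0 : Int) (p : Int × Int) :
    p ∈ activePairs cl c0 ↔ ∃ j : Nat, cl[j]? = some (some p.1) ∧ p.2 = c0 + j := by
  induction cl generalizing c0 with
  | nil => simp [activePairs]
  | cons o t ih =>
    cases o with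
    | none =>
      simp only [activePairs, ih]
      constructor
      · rintro ⟨j, hj, hc⟩
        exact ⟨j + 1, by simpa using hj, by push_cast at hc ⊢; omega⟩
      · rintro ⟨j, hj, hc⟩
        cases j with
        | zero => simp at hj
        | succ j => exact ⟨j, by simpa using hj, by push_cast at hc ⊢; omega⟩
    | some v =>
      simp only [activePairs, List.mem_cons, ih]
      constructor
      · rintro (rfl | ⟨j, hj, hc⟩)
        · exact ⟨0, by simp, by simp⟩
        · exact ⟨j + 1, by simpa using hj, by push_cast at hc ⊢; omega⟩
      · rintro ⟨j, hj, hc⟩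
        cases j with
        | zero =>
          left
          simp only [List.getElem?_cons_zero, Option.some.injEq] at hj
          obtain ⟨p1, p2⟩ := p
          simp_all
        | succ j => right; exact ⟨j, by simpa using hj, by push_cast at hc ⊢; omega⟩

lemma activePairs_snd_pairwise (cl : List (Option Int)) (c0 : Int) :
    (activePairs cl c0).Pairwise (fun p q => p.2 < q.2) := by
  induction cl generalizing c0 with
  | nil => simp [activePairs]
  | cons o t ih =>
    cases o with
    | none => simpa [activePairs] using ih (c0 + 1)
    | some v =>
      simp only [activePairs, List.pairwise_cons]
      refine ⟨?_, ih (c0 + 1)⟩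
      intro q hq
      obtain ⟨j, _, hc⟩ := (mem_activePairs t (c0 + 1) q).1 hq
      show c0 < q.2
      omega

lemma activePairs_set_none (cl : List (Option Int)) (j : Nat) (v : Int) (c0 : Int)
    (hj : cl[j]? = some (some v)) :
    List.Perm (activePairs cl c0) ((v, c0 + j) :: activePairs (cl.set j none) c0) := by
  induction cl generalizing j c0 with
  | nil => simp at hj
  | cons o t ih =>
    cases j with
    | zero =>
      simp only [List.getElem?_cons_zero, Option.some.injEq] at hj
      subst hj
      simp [activePairs]
    | succ j =>
      have harith : (c0 + (↑(j + 1) : Int)) = (c0 + 1) + (j : Int) := by push_cast; ring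
      cases o with
      | none =>
        simp only [activePairs, List.set_cons_succ, harith]
        exact ih j (c0 + 1) (by simpa using hj)
      | some w =>
        simp only [activePairs, List.set_cons_succ, harith]
        exact (((ih j (c0 + 1) (by simpa using hj)).cons _).trans (List.Perm.swap _ _ _))

lemma insortPair_perm (l : List (Int × Int)) (p : Int × Int) : List.Perm (insortPair l p) (p :: l) := by
  induction l with
  | nil => simp [insortPair]
  | cons q rest ih =>
    rw [insortPair]
    split_ifs with h
    · exact List.Perm.refl _
    · exact (ih.cons _).trans (List.Perm.swap _ _ _)

lemma insortPair_pairwise (l : List (Int × Int)) (p : Int × Int)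
    (hl : l.Pairwise pLt) (hne : ∀ q ∈ l, q.2 ≠ p.2) : (insortPair l p).Pairwise pLt := by
  induction l with
  | nil => simp [insortPair, pLt]
  | cons q rest ih =>
    rw [insortPair]
    rw [List.pairwise_cons] at hl
    split_ifs with h
    · refine List.pairwise_cons.2 ⟨?_, List.pairwise_cons.2 hl⟩
      intro x hx
      rcases List.mem_cons.1 hx with rfl | hx
      · exact h
      · have hq := hl.1 x hx
        rcases h with h | h <;> rcases hq with hq | hq <;>
          simp only [pLt] at * <;> omega
    · refine List.pairwise_cons.2 ⟨?_, ih hl.2 (fun r hr => hne r (List.mem_cons_of_mem _ hr))⟩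
      intro x hx
      have hx' := (insortPair_perm rest p).mem_iff.1 hx
      rcases List.mem_cons.1 hx' with rfl | hx'
      · have hqp := hne q (List.mem_cons_self ..)
        simp only [pLt] at h ⊢
        omega
      · exact hl.1 x hx' 

lemma min2?_go (t : List (Option Int)) (m : Option Int) :
    ∃ m', PySem.List.min2? (m :: t) pyInfKey1 pyInfKey2 = some m' ∧ m' ∈ m :: t ∧
      ∀ x ∈ m :: t, ¬ (pyInfKey1 x < pyInfKey1 m' ∨
        (pyInfKey1 x = pyInfKey1 m' ∧ pyInfKey2 x < pyInfKey2 m')) := by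
  induction t generalizing m with
  | nil =>
    refine ⟨m, by simp [PySem.List.min2?], by simp, ?_⟩
    intro x hx
    simp only [List.mem_singleton] at hx
    subst hx
    omega
  | cons y t ih =>
    by_cases hC : pyInfKey1 y < pyInfKey1 m ∨ pyInfKey1 y ≤ pyInfKey1 m ∧ pyInfKey2 y < pyInfKey2 m
    · have hstep : PySem.List.min2? (m :: y :: t) pyInfKey1 pyInfKey2
          = PySem.List.min2? (y :: t) pyInfKey1 pyInfKey2 := by
        simp [PySem.List.min2?, hC]
      obtain ⟨m', h1, h2, h3⟩ := ih y
      refine ⟨m', hstep.trans h1, List.mem_cons_of_mem _ h2, ?_⟩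
      intro x hx
      rcases List.mem_cons.1 hx with rfl | hx
      · have hy := h3 y (List.mem_cons_self ..)
        omega
      · exact h3 x hx
    · have hstep : PySem.List.min2? (m :: y :: t) pyInfKey1 pyInfKey2
          = PySem.List.min2? (m :: t) pyInfKey1 pyInfKey2 := by
        simp [PySem.List.min2?, hC]
      obtain ⟨m', h1, h2, h3⟩ := ih m
      have hm' : m' ∈ m :: y :: t := by
        rcases List.mem_cons.1 h2 with rfl | h2
        · exact List.mem_cons_self ..
        · exact List.mem_cons_of_mem _ (List.mem_cons_of_mem _ h2)
      refine ⟨m', hstep.trans h1, hm', ?_⟩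
      intro x hx
      rcases List.mem_cons.1 hx with rfl | hx
      · exact h3 x (List.mem_cons_self ..)
      rcases List.mem_cons.1 hx with rfl | hx
      · have hm := h3 m (List.mem_cons_self ..)
        omega
      · exact h3 x (List.mem_cons_of_mem _ hx)

lemma min2?_char (xs : List (Option Int)) (hne : xs ≠ []) :
    ∃ m, PySem.List.min2? xs pyInfKey1 pyInfKey2 = some m ∧ m ∈ xs ∧
      ∀ x ∈ xs, ¬ (pyInfKey1 x < pyInfKey1 m ∨
        (pyInfKey1 x = pyInfKey1 m ∧ pyInfKey2 x < pyInfKey2 m)) := by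
  cases xs with
  | nil => exact absurd rfl hne
  | cons x t => exact min2?_go t x

lemma index?_eq_of_first (cl : List (Option Int)) (v : Option Int) (j : Nat)
    (hj : cl[j]? = some v) (hmin : ∀ i, i < j → cl[i]? ≠ some v) :
    PySem.List.index? cl v = some j := by
  have hjlt : j < cl.length := by
    by_contra h
    rw [List.getElem?_eq_none (by omega)] at hj
    simp at hj
  have hje : cl[j] = v := by
    rw [List.getElem?_eq_getElem hjlt] at hj
    exact Option.some.inj hj
  rw [PySem.List.index?_eq_some_iff]
  refine ⟨cl.take j, cl.drop (j + 1), ?_, ?_, ?_⟩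
  · conv_lhs => rw [← List.take_append_drop j cl]
    rw [← List.getElem_cons_drop hjlt, hje]
  · simpa using Nat.le_of_lt hjlt
  · intro hmem
    obtain ⟨i, hi, hie⟩ := List.mem_take_iff_getElem.1 hmem
    exact hmin i (by omega) (by rw [List.getElem?_eq_getElem (by omega)]; exact congrArg some hie)

lemma sum_set_nat (l : List Nat) (i : Nat) (a : Nat) (h : i < l.length) :
    (l.set i a).sum + l[i] = l.sum + a := by
  induction l generalizing i with
  | nil => simp at h
  | cons x t ih =>
    cases i with
    | zero => simp [List.set]; omega
    | succ i =>
      simp only [List.set_cons_succ, List.sum_cons, List.getElem_cons_succ]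
      have := ih i (by simpa using h)
      omega

lemma step_inv (lengths : List Int) (k P m : Nat) (hm : m < k * P)
    (stA : List (List Int) × List (Option Int)) (stB : List (List Int) × List (Int × Int))
    (inv : SimInv k P m stA stB) (index : Int) :
    SimInv k P (m + 1) (stepA lengths (P : Int) stA index) (stepB lengths (P : Int) stB index) := by
  obtain ⟨cA, cl⟩ := stA
  obtain ⟨cB, act⟩ := stB
  obtain ⟨hchunks, hlenC, hlenL, hsorted, hperm, hfull, hle, hsum⟩ := inv
  simp only at hchunks hlenC hlenL hsorted hperm hfull hle hsum
  -- the active queue cannot be empty while fewer than k*P indices are processed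
  cases act with
  | nil =>
    exfalso
    have hAP : activePairs cl 0 = [] := hperm.symm.eq_nil
    have hallfull : ∀ b ∈ cA.map List.length, b = P := by
      intro b hb
      obtain ⟨ch, hch, rfl⟩ := List.mem_map.1 hb
      obtain ⟨j, hj, hje⟩ := List.getElem_of_mem hch
      have hj' : j < k := by omega
      cases hclj : cl[j]? with
      | none =>
        rw [List.getElem?_eq_none_iff] at hclj
        omega
      | some o =>
        cases o with
        | none =>
          have := (hfull j hj').1 hclj
          rw [List.getElem?_eq_getElem hj, hje] at this
          simpa using this
        | some v =>
          have : ((v, (j : Int)) : Int × Int) ∈ activePairs cl 0 := by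
            rw [mem_activePairs]
            exact ⟨j, hclj, by simp⟩
          rw [hAP] at this
          simp at this
    have : cA.map List.length = List.replicate k P :=
      List.eq_replicate_iff.2 ⟨by simpa using hlenC, hallfull⟩
    rw [this, List.sum_replicate, smul_eq_mul] at hsum
    omega
  | cons hd rest =>
  obtain ⟨t, c⟩ := hd
  -- the head of the queue names a real, non-full chunk cN
  obtain ⟨cN, hcl, hc⟩ := (mem_activePairs cl 0 (t, c)).1 (hperm.subset (List.mem_cons_self ..))
  simp only at hcl hc
  have hc' : c = (cN : Int) := by omega
  have hcNk : cN < k := by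
    have : cN < cl.length := by
      by_contra h
      rw [List.getElem?_eq_none (by omega)] at hcl
      simp at hcl
    omega
  -- the head is the lexicographic minimum among active pairs
  have hminAll : ∀ q ∈ activePairs cl 0, q = (t, c) ∨ pLt (t, c) q := by
    intro q hq
    rcases List.mem_cons.1 (hperm.mem_iff.2 hq) with rfl | hq'
    · exact Or.inl rfl
    · exact Or.inr ((List.pairwise_cons.1 hsorted).1 q hq')
  -- A's min(chunks_lengths) is the value at cN
  have hclne : cl ≠ [] := by
    intro h
    rw [h] at hcl
    simp at hcl
  obtain ⟨mv, hmv, hmvmem, hmvmin⟩ := min2?_char cl hclne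
  have htmem : (some t) ∈ cl := List.mem_of_getElem? hcl
  have hmvt : mv = some t := by
    cases mv with
    | none =>
      exact absurd (Or.inl (by simp [pyInfKey1])) (hmvmin (some t) htmem)
    | some u =>
      obtain ⟨j, hj, hje⟩ := List.getElem_of_mem hmvmem
      have huj : ((u, (j : Int)) : Int × Int) ∈ activePairs cl 0 := by
        rw [mem_activePairs]
        exact ⟨j, by rw [List.getElem?_eq_getElem hj, hje], by simp⟩
      have hut : t ≤ u := by
        rcases hminAll _ huj with heq | hlt
        · simp only [Prod.mk.injEq] at heq
          omega
        · rcases hlt with h | ⟨h, _⟩ <;> omega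
      have hle' := hmvmin (some t) htmem
      simp [pyInfKey1, pyInfKey2] at hle'
      have : u = t := by omega
      rw [this]
  -- A's .index finds exactly cN
  have hidx : PySem.List.index? cl (some t) = some cN := by
    refine index?_eq_of_first cl (some t) cN hcl ?_
    intro i hi hie
    have : ((t, (i : Int)) : Int × Int) ∈ activePairs cl 0 := by
      rw [mem_activePairs]
      exact ⟨i, hie, by simp⟩
    rcases hminAll _ this with heq | hlt
    · simp only [Prod.mk.injEq] at heq
      omega
    · rcases hlt with h | ⟨-, h⟩
      · omega
      · omega
  have hshort : (PySem.List.index? cl ((PySem.List.min2? cl pyInfKey1 pyInfKey2).getD none)).getD 0 = cN := by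
    rw [hmv, hmvt, Option.getD_some, hidx, Option.getD_some]
  have hctn : c.toNat = cN := by rw [hc']; exact Int.toNat_natCast cN
  have hcAlen : cN < cA.length := by omega
  have hgetDcl : cl.getD cN none = some t := by
    rw [List.getD_eq_getElem?_getD, hcl, Option.getD_some]
  set L := PySem.List.pyGetD lengths index 0 with hL
  set lA := cA.getD cN [] with hlAdef
  have hlAq : (cA[cN]?).getD [] = lA := by rw [hlAdef, List.getD_eq_getElem?_getD]
  have hnewget : (cA.set cN (lA ++ [index])).getD cN [] = lA ++ [index] := by
    rw [List.getD_eq_getElem?_getD, List.getElem?_set_self hcAlen, Option.getD_some]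
  have hlenle : lA.length ≤ P := by rw [← hlAq] at *; exact hle cN hcNk
  have hlenne : lA.length ≠ P := by
    intro h
    have := (hfull cN hcNk).2 (by rw [hlAq]; exact h)
    rw [hcl] at this
    simp at this
  -- the two branch conditions are complementary
  have hcastP : (((lA ++ [index]).length : Nat) : Int) = ((lA.length + 1 : Nat) : Int) := by
    simp
  -- permutation bookkeeping
  have hap := activePairs_set_none cl cN t 0 hcl
  have h0cN : ((0 : Int) + (cN : Int)) = c := by omega
  rw [h0cN] at hap
  have hrest : List.Perm rest (activePairs (cl.set cN none) 0) :=
    List.Perm.cons_inv (hperm.trans hap)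
  -- chunk ids in the queue are pairwise distinct
  have hsnd : ∀ q ∈ rest, q.2 ≠ c := by
    have hpw : ((activePairs cl 0).map Prod.snd).Pairwise (· < ·) :=
      List.Pairwise.map Prod.snd (fun a b h => h) (activePairs_snd_pairwise cl 0)
    have hnd : (((t, c) :: rest).map Prod.snd).Nodup :=
      (List.Perm.nodup_iff (hperm.map Prod.snd)).2 (hpw.imp ne_of_lt)
    intro q hq hqc
    obtain ⟨hnotin, -⟩ : (∀ (x : Int), (x, c) ∉ rest) ∧ (List.map Prod.snd rest).Nodup := by
      simpa using hnd
    obtain ⟨q1, q2⟩ := q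
    simp only at hqc
    subst hqc
    exact hnotin q1 hq
  -- the new chunks list on both sides
  have hsumnew : ((cA.set cN (lA ++ [index])).map List.length).sum = m + 1 := by
    rw [List.map_set]
    have hlen2 : cN < (cA.map List.length).length := by simpa using hcAlen
    have h2 := sum_set_nat (cA.map List.length) cN (lA ++ [index]).length hlen2
    have hlAe : cA[cN]'hcAlen = lA := by
      simp [hlAdef, List.getD_eq_getElem?_getD, List.getElem?_eq_getElem hcAlen]
    rw [List.getElem_map] at h2
    rw [hlAe] at h2
    simp only [List.length_append, List.length_cons, List.length_nil] at h2 ⊢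
    omega
  have hlenCnew : (cA.set cN (lA ++ [index])).length = k := by simpa using hlenC
  by_cases hfp : lA.length + 1 = P
  · -- the chunk becomes full: A writes inf, B drops it from the queue
    have hA : stepA lengths (P : Int) (cA, cl) index
        = (cA.set cN (lA ++ [index]), cl.set cN none) := by
      simp only [stepA, hshort, hgetDcl, hnewget, ← hlAdef, ← hL]
      rw [if_pos (by rw [hcastP]; exact_mod_cast congrArg (fun n : Nat => (n : Int)) hfp)]
      rw [List.set_set]
    have hB : stepB lengths (P : Int) (cB, (t, c) :: rest) index
        = (cA.set cN (lA ++ [index]), rest) := by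
      simp only [stepB, hchunks, hctn, ← hlAdef, hnewget, ← hL]
      rw [if_neg (by rw [hcastP]; push_cast; omega)]
    rw [hA, hB]
    refine ⟨rfl, hlenCnew, by simpa using hlenL, (List.pairwise_cons.1 hsorted).2, hrest, ?_, ?_, hsumnew⟩
    · intro c' hc'k
      by_cases hcc : c' = cN
      · subst hcc
        rw [List.getElem?_set_self (by omega), List.getElem?_set_self hcAlen]
        simp [hfp]
      · rw [List.getElem?_set_ne (fun h => hcc h.symm), List.getElem?_set_ne (fun h => hcc h.symm)]
        exact hfull c' hc'k
    · intro c' hc'k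
      by_cases hcc : c' = cN
      · subst hcc
        rw [List.getElem?_set_self hcAlen]
        simp
        omega
      · rw [List.getElem?_set_ne (fun h => hcc h.symm)]
        exact hle c' hc'k
  · -- the chunk stays active: A bumps its length, B re-inserts the updated pair
    have hA : stepA lengths (P : Int) (cA, cl) index
        = (cA.set cN (lA ++ [index]), cl.set cN (some (t + L))) := by
      simp only [stepA, hshort, hgetDcl, hnewget, ← hlAdef, ← hL]
      rw [if_neg (by rw [hcastP]; push_cast; omega)]
      rfl
    have hB : stepB lengths (P : Int) (cB, (t, c) :: rest) index
        = (cA.set cN (lA ++ [index]), insortPair rest (t + L, c)) := by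
      simp only [stepB, hchunks, hctn, ← hlAdef, hnewget, ← hL]
      rw [if_pos (by rw [hcastP]; push_cast; omega)]
    rw [hA, hB]
    have hap2 : List.Perm (activePairs (cl.set cN (some (t + L))) 0)
        ((t + L, c) :: activePairs (cl.set cN none) 0) := by
      have h1 : (cl.set cN (some (t + L)))[cN]? = some (some (t + L)) :=
        List.getElem?_set_self (by omega)
      have := activePairs_set_none (cl.set cN (some (t + L))) cN (t + L) 0 h1
      rw [List.set_set, h0cN] at this
      exact this
    refine ⟨rfl, hlenCnew, by simpa using hlenL, ?_, ?_, ?_, ?_, hsumnew⟩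
    · exact insortPair_pairwise rest (t + L, c) (List.pairwise_cons.1 hsorted).2
        (fun q hq => hsnd q hq)
    · exact ((insortPair_perm rest (t + L, c)).trans (hrest.cons _)).trans hap2.symm
    · intro c' hc'k
      by_cases hcc : c' = cN
      · subst hcc
        rw [List.getElem?_set_self (by omega), List.getElem?_set_self hcAlen]
        simp
        omega
      · rw [List.getElem?_set_ne (fun h => hcc h.symm), List.getElem?_set_ne (fun h => hcc h.symm)]
        exact hfull c' hc'k
    · intro c' hc'k
      by_cases hcc : c' = cN
      · subst hcc
        rw [List.getElem?_set_self hcAlen]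
        simp
        omega
      · rw [List.getElem?_set_ne (fun h => hcc h.symm)]
        exact hle c' hc'k

lemma fold_agree (lengths : List Int) (k P : Nat) :
    ∀ (rem : List Int) (m : Nat)
      (stA : List (List Int) × List (Option Int)) (stB : List (List Int) × List (Int × Int)),
      SimInv k P m stA stB → m + rem.length = k * P →
      (rem.foldl (stepA lengths (P : Int)) stA).1 = (rem.foldl (stepB lengths (P : Int)) stB).1 := by
  intro rem
  induction rem with
  | nil =>
    intro m stA stB inv _
    exact inv.hchunks.symm
  | cons x rs ih =>
    intro m stA stB inv hnum
    simp only [List.foldl_cons]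
    refine ih (m + 1) _ _ (step_inv lengths k P m (by simp at hnum; omega) stA stB inv x) ?_
    simp at hnum ⊢
    omega

lemma activePairs_replicate (n : Nat) (c0 : Int) :
    activePairs (List.replicate n (some (0 : Int))) c0
      = (List.range n).map (fun j : Nat => ((0 : Int), c0 + (j : Int))) := by
  induction n generalizing c0 with
  | zero => simp [activePairs]
  | succ n ih =>
    rw [List.replicate_succ, List.range_succ_eq_map]
    simp only [activePairs, List.map_cons, List.map_map, Nat.cast_zero, add_zero]
    rw [ih (c0 + 1)]
    refine congrArg _ (List.map_congr_left ?_)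
    intro j _
    simp only [Function.comp_apply, Nat.succ_eq_add_one, Prod.mk.injEq, true_and]
    push_cast
    ring

-- ===== VERDICT (by name: the statement is the Claim_ definition above) =====
lemma init_siminv (k P : Nat) (hP : 0 < P) (num_chunks : Int) (hkc : (k : Int) = num_chunks) :
    SimInv k P 0
      ((PySem.List.pyRange 0 num_chunks 1).map (fun _ => ([] : List Int)),
       (PySem.List.pyRange 0 num_chunks 1).map (fun _ => some (0 : Int)))
      ((PySem.List.pyRange 0 num_chunks 1).map (fun _ => ([] : List Int)),
       (PySem.List.pyRange 0 num_chunks 1).map (fun c => ((0 : Int), c))) := by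
  have hrange : PySem.List.pyRange 0 num_chunks 1 = (List.range k).map (fun j : Nat => (j : Int)) := by
    rw [PySem.List.pyRange_one]
    have : (num_chunks - 0).toNat = k := by omega
    rw [this]
    exact List.map_congr_left (fun j _ => by omega)
  have hchunks0 : (PySem.List.pyRange 0 num_chunks 1).map (fun _ => ([] : List Int))
      = List.replicate k [] := by
    rw [hrange, List.map_map]
    simp [Function.comp_def, List.map_const']
  have hcl0 : (PySem.List.pyRange 0 num_chunks 1).map (fun _ => some (0 : Int))
      = List.replicate k (some 0) := by
    rw [hrange, List.map_map]
    simp [Function.comp_def, List.map_const']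
  have hact0 : (PySem.List.pyRange 0 num_chunks 1).map (fun c => ((0 : Int), c))
      = (List.range k).map (fun j : Nat => ((0 : Int), (j : Int))) := by
    rw [hrange, List.map_map]
    rfl
  refine ⟨rfl, ?_, ?_, ?_, ?_, ?_, ?_, ?_⟩
  · simp [hchunks0]
  · simp [hcl0]
  · simp only [hact0]
    refine List.Pairwise.map _ (fun a b h => ?_) List.pairwise_lt_range
    exact Or.inr ⟨rfl, by simpa using (Nat.cast_lt (α := Int)).2 h⟩
  · simp only [hact0, hcl0, activePairs_replicate]
    have : (List.range k).map (fun j : Nat => ((0 : Int), (j : Int)))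
        = (List.range k).map (fun j : Nat => ((0 : Int), (0 : Int) + (j : Int))) :=
      List.map_congr_left (fun j _ => by simp)
    rw [this]
  · intro c hc
    simp only [hchunks0, hcl0, List.getElem?_replicate]
    simp [hc]
    omega
  · intro c hc
    simp only [hchunks0, List.getElem?_replicate]
    simp [hc]
  · simp [hchunks0]

theorem split_to_even_chunks_spec : Claim_equal_split_to_even_chunks := by
  unfold Claim_equal_split_to_even_chunks
  intro indices lengths num_chunks hdom hpre
  obtain ⟨hnz, hdiv⟩ := hpre
  unfold Spec_split_to_even_chunks
  by_cases hmod : PySem.Int.mod (indices.length : Int) num_chunks = 0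
  · unfold split_to_even_chunks split_to_even_chunks_alt
    rw [if_neg (not_not_intro hmod), if_neg (not_not_intro hmod)]
    by_cases hempty : indices = []
    · subst hempty
      rfl
    · have hk1 : 1 ≤ num_chunks := by
        rcases (hdiv hmod).1 with h | h
        · exact h
        · exact absurd h hempty
      have hn0 : 0 < indices.length := List.length_pos_iff.2 hempty
      have hdvd : num_chunks ∣ (indices.length : Int) := (PySem.Int.mod_eq_zero_iff_dvd _ _).1 hmod
      obtain ⟨q, hq⟩ := hdvd
      have hq0 : 0 < q := by
        by_contra h
        push Not at h
        have h1 : num_chunks * q ≤ 0 := mul_nonpos_of_nonneg_of_nonpos (by omega) h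
        have h2 : (0 : Int) < (indices.length : Int) := by exact_mod_cast hn0
        linarith [hq.ge, hq.le]
      have hper : PySem.Int.floordiv (indices.length : Int) num_chunks = q := by
        rw [PySem.Int.floordiv_eq_iff_of_pos (by omega)]
        refine ⟨by rw [hq, mul_comm], ?_⟩
        rw [hq]
        nlinarith
      have hPq : ((q.toNat : Nat) : Int) = q := Int.toNat_of_nonneg (by omega)
      have hnkP : indices.length = num_chunks.toNat * q.toNat := by
        have h2 : (indices.length : Int) = (num_chunks.toNat : Int) * ((q.toNat : Nat) : Int) := by
          rw [hPq, Int.toNat_of_nonneg (by omega : (0:Int) ≤ num_chunks)]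
          exact hq
        exact_mod_cast h2
      have hP : 0 < q.toNat := by omega
      have hper2 : PySem.Int.floordiv (indices.length : Int) num_chunks
          = ((q.toNat : Nat) : Int) := by rw [hper, hPq]
      simp only [hper2]
      exact fold_agree lengths num_chunks.toNat q.toNat indices 0 _ _
        (init_siminv num_chunks.toNat q.toNat hP num_chunks
          (Int.toNat_of_nonneg (by omega))) (by omega)
  · unfold split_to_even_chunks split_to_even_chunks_alt
    rw [if_pos hmod, if_pos hmod]
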